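-- pv_equiv track=rewrite | github.com/cowboysmall-comp/hackerrank | src/algorithms/arrays_and_sorting/countingsort4.py | sort_values
-- ===== SOURCE A (Python) =====
-- def count_elements(array):
--     counter = [0 for _ in range(100)]
--
--     for val in array:
--         counter[val] += 1
--
--     return counter
--
-- def count_leq(array):
--     counts = count_elements(array)
--     L      = [counts[0]]
--
--     for i in range(1, len(counts)):
--         L.append(counts[i] + L[i - 1])
--
--     return L
--
-- def sort_values(count, array):
--     M = count // 2
--     L = count_leq([val[0] for val in array])
--     S = [None for _ in range(count)]
--
--     for index, value in enumerate(reversed(array)):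
--         S[L[value[0]] - 1] = value[1] if index < M else '-'
--         L[value[0]] -= 1
--
--     return S
-- ===== SOURCE B (Python) =====
-- def sort_values(count, array):
--     m = count // 2
--     t = len(array) - m
--     buckets = [[] for _ in range(100)]
--     for i, (key, val) in enumerate(array):
--         buckets[key].append(val if i >= t else '-')
--     flat = [v for b in buckets for v in b]
--     return flat + [None] * (count - len(flat))
-- ===== Notes on version B (the rewrite author's own statement) =====
-- stated objective: idiomatic
-- what changed: Replaces A's counting table, prefix-sum table and reverse placement into a preallocated slot list by a single forward pass appending each (masked) payload into one of 100 per-key buckets, then flattening the buckets in key order and padding with None.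
import Mathlib
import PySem

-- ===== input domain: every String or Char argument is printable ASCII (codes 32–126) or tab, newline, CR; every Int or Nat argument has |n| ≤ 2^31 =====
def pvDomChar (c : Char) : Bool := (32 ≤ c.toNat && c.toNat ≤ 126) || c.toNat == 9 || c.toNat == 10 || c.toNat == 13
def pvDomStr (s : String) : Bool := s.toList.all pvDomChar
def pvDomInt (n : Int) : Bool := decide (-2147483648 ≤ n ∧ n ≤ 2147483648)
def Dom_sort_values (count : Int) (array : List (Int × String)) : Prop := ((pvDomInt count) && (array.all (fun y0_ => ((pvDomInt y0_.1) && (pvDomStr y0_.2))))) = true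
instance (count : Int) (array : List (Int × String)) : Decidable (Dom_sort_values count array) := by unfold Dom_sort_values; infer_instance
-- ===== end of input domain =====

-- B replaces A's counting table + reverse placement into a preallocated slot array by
-- forward appends into 100 per-key buckets that are flattened and padded (objective: idiomatic).

-- ===== PORT A =====
def count_elements (array : List Int) : List Int :=
  array.foldl
    (fun counter val => PySem.List.pySetD counter val (PySem.List.pyGetD counter val 0 + 1))
    ((PySem.List.pyRange 0 100 1).map (fun _ => (0 : Int)))

def count_leq (array : List Int) : List Int :=
  let counts := count_elements array
  (PySem.List.pyRange 1 (counts.length : Int) 1).foldl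
    (fun L i => L ++ [PySem.List.pyGetD counts i 0 + PySem.List.pyGetD L (i - 1) 0])
    [PySem.List.pyGetD counts 0 0]

def sort_values (count : Int) (array : List (Int × String)) : List (Option String) :=
  let M := PySem.Int.floordiv count 2
  let L := count_leq (array.map (fun val => val.1))
  let S : List (Option String) := (PySem.List.pyRange 0 count 1).map (fun _ => none)
  let r := (PySem.List.enumerate array.reverse 0).foldl
    (fun (SL : List (Option String) × List Int) iv =>
      (PySem.List.pySetD SL.1 (PySem.List.pyGetD SL.2 iv.2.1 0 - 1)
          (if iv.1 < M then some iv.2.2 else some "-"),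
       PySem.List.pySetD SL.2 iv.2.1 (PySem.List.pyGetD SL.2 iv.2.1 0 - 1)))
    (S, L)
  r.1

-- ===== PORT B =====
def sort_values_alt (count : Int) (array : List (Int × String)) : List (Option String) :=
  let M := PySem.Int.floordiv count 2
  let T := (array.length : Int) - M
  let buckets0 : List (List String) := (PySem.List.pyRange 0 100 1).map (fun _ => [])
  let buckets := (PySem.List.enumerate array 0).foldl
    (fun b p =>
      PySem.List.pySetD b p.2.1
        (PySem.List.pyGetD b p.2.1 [] ++ [if T ≤ p.1 then p.2.2 else "-"]))
    buckets0
  let flat := buckets.flatMap (fun b => b)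
  flat.map (fun v => some v) ++ List.replicate (count - (flat.length : Int)).toNat none

-- ===== PRECONDITION & SPEC =====
-- Pre_ excludes exactly the inputs where A raises IndexError: a nonempty array with a key
-- outside [-100, 100) (counter[key] out of range), or count < len(array) (placement past S).
def Pre_sort_values (count : Int) (array : List (Int × String)) : Prop :=
  array = [] ∨ ((array.length : Int) ≤ count ∧ ∀ p ∈ array, -100 ≤ p.1 ∧ p.1 < 100)
instance (count : Int) (array : List (Int × String)) : Decidable (Pre_sort_values count array) := by
  unfold Pre_sort_values; infer_instance

def pvWitness_sort_values : Int × (List (Int × String)) := (4, [(5, "a"), (2, "b"), (5, "c")])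

def Spec_sort_values (count : Int) (array : List (Int × String)) (out : List (Option String)) : Prop := out = sort_values_alt count array
instance (count : Int) (array : List (Int × String)) (out : List (Option String)) : Decidable (Spec_sort_values count array out) := by unfold Spec_sort_values; infer_instance

-- ===== CLAIM (what is proved, stated in full; the proofs are below) =====
def Claim_equal_sort_values : Prop := ∀ (count : Int) (array : List (Int × String)), Dom_sort_values count array → Pre_sort_values count array → Spec_sort_values count array (sort_values count array)

-- ===== LEMMAS AND PROOFS =====

-- Python's index into a length-100 list, for -100 ≤ k < 100.
def pykey (k : Int) : Nat := (if k < 0 then k + 100 else k).toNat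

-- Clean form of A's placement loop: elements are processed from the TAIL of the list
-- (A iterates the array reversed), each written at slot (L key) - 1, key slot decremented.
def wb (l : List (Nat × String)) (S : List (Option String)) (L : Nat → Int) :
    List (Option String) × (Nat → Int) :=
  match l with
  | [] => (S, L)
  | (k, v) :: rest =>
      let SL := wb rest S L
      (PySem.List.pySetD SL.1 (SL.2 k - 1) (some v),
       Function.update SL.2 k (SL.2 k - 1))

-- one grouped bucket of the output: the padding holes of this key, then its payloads in order
def block (ml : List (Nat × String)) (mz : List Nat) (j : Nat) : List (Option String) :=
  List.replicate (mz.count j) none ++ (ml.filter (fun p => p.1 == j)).map (fun p => some p.2)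

lemma pykey_lt (k : Int) (h1 : -100 ≤ k) (h2 : k < 100) : pykey k < 100 := by
  unfold pykey; split <;> omega

lemma pySetD_neg {α : Type} (xs : List α) (i : Int) (v : α) (h0 : -(xs.length : Int) ≤ i)
    (h1 : i < 0) : PySem.List.pySetD xs i v = xs.set ((xs.length : Int) + i).toNat v := by
  have h2 : ¬ 0 ≤ i := by omega
  simp only [PySem.List.pySetD, PySem.List.pySet?, PySem.List.pyIdx?, if_neg h2, if_pos h0,
    Option.map_some, Option.getD_some]
  congr 1
  omega

lemma table_get {γ : Type} (f : Nat → γ) (k : Int) (d : γ) (h1 : -100 ≤ k) (h2 : k < 100) :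
    PySem.List.pyGetD ((List.range 100).map f) k d = f (pykey k) := by
  have hlen : ((List.range 100).map f).length = 100 := by simp
  by_cases h : 0 ≤ k
  · rw [PySem.List.pyGetD_eq_getElem _ _ h (by rw [hlen]; exact_mod_cast h2)]
    simp only [List.getElem_map, List.getElem_range]
    congr 1
    simp [pykey, if_neg (by omega : ¬ k < 0)]
  · have hk : k = -(((-k).toNat : Nat) : Int) := by omega
    rw [hk, PySem.List.pyGetD_neg_natCast _ _ _ (by omega) (by rw [hlen]; omega)]
    simp only [List.getElem_map, List.getElem_range]
    congr 1
    simp only [pykey]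
    omega

lemma table_set {γ : Type} (f : Nat → γ) (k : Int) (v : γ) (h1 : -100 ≤ k) (h2 : k < 100) :
    PySem.List.pySetD ((List.range 100).map f) k v
      = (List.range 100).map (fun j => if j = pykey k then v else f j) := by
  have hlen : ((List.range 100).map f).length = 100 := by simp
  have hset : ∀ m : Nat, m = pykey k →
      ((List.range 100).map f).set m v
        = (List.range 100).map (fun j => if j = pykey k then v else f j) := by
    intro m hm
    apply List.ext_getElem (by simp)
    intro n hn hn'
    simp only [List.length_set, hlen] at hn
    rw [List.getElem_set]
    simp only [List.getElem_map, List.getElem_range]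
    split
    · rename_i he; rw [if_pos (by omega)]
    · rw [if_neg (by omega)]
  by_cases h : 0 ≤ k
  · rw [PySem.List.pySetD_of_nonneg _ _ h]
    exact hset _ (by simp [pykey, if_neg (by omega : ¬ k < 0)])
  · rw [pySetD_neg _ _ _ (by omega) (by omega)]
    apply hset
    simp only [pykey]
    omega

lemma foldl_table {β γ : Type} (l : List β) (key : β → Int) (g : γ → β → γ) (d : γ)
    (f : Nat → γ) (hk : ∀ x ∈ l, -100 ≤ key x ∧ key x < 100) :
    l.foldl (fun t x => PySem.List.pySetD t (key x) (g (PySem.List.pyGetD t (key x) d) x))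
      ((List.range 100).map f)
    = (List.range 100).map (fun j => (l.filter (fun x => pykey (key x) == j)).foldl g (f j)) := by
  induction l generalizing f with
  | nil => simp
  | cons x l ih =>
    have hx := hk x (List.mem_cons_self)
    simp only [List.foldl_cons]
    rw [table_get f _ d hx.1 hx.2, table_set f _ _ hx.1 hx.2,
      ih _ (fun y hy => hk y (List.mem_cons_of_mem _ hy))]
    apply List.map_congr_left
    intro j hj
    by_cases hkey : pykey (key x) = j
    · rw [List.filter_cons_of_pos (by simp [hkey]), List.foldl_cons, if_pos hkey.symm, hkey]
    · rw [List.filter_cons_of_neg (by simp [hkey]), if_neg (fun h => hkey h.symm)]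

lemma wb_snd (l : List (Nat × String)) (S : List (Option String)) (L : Nat → Int) (j : Nat) :
    (wb l S L).2 j = L j - ((l.map Prod.fst).count j : Int) := by
  induction l with
  | nil => simp [wb]
  | cons p rest ih =>
    obtain ⟨k, v⟩ := p
    simp only [wb, List.map_cons, List.count_cons]
    rw [Function.update_apply]
    by_cases h : j = k
    · subst h
      rw [ih]
      simp
      omega
    · rw [ih, if_neg h,
        if_neg (show ¬ (k == j) = true by simp only [beq_iff_eq]; exact fun hh => h hh.symm)]
      omega

-- counting helpers -----------------------------------------------------------

lemma countP_le_split (l : List Nat) (m : Nat) :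
    l.countP (fun y => y ≤ m) = l.countP (fun y => y < m) + l.count m := by
  induction l with
  | nil => simp
  | cons a l ih =>
    simp only [List.countP_cons, List.count_cons, ih, beq_iff_eq]
    by_cases h3 : a = m
    · subst h3
      simp
      omega
    · by_cases h2 : a < m
      · simp only [h3, Nat.le_of_lt h2, h2, decide_true, if_true, if_false]
        omega
      · simp [h3, h2, show ¬ a ≤ m by omega]

lemma sum_count_range (l : List Nat) (n : Nat) :
    ((List.range n).map (fun j => l.count j)).sum = l.countP (fun y => y < n) := by
  induction n with
  | zero => simp
  | succ n ih =>
    rw [List.range_succ, List.map_append, List.sum_append, ih]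
    simp only [List.map_cons, List.sum_cons, List.map_nil, List.sum_nil, Nat.add_zero]
    have he : l.countP (fun y => y < n + 1) = l.countP (fun y => y ≤ n) := by
      apply List.countP_congr
      intro a _
      constructor <;> (intro hx; simp at hx ⊢; omega)
    rw [he, countP_le_split]

lemma flatMap_replicate_none (g : Nat → Nat) (n : Nat) :
    (List.range n).flatMap (fun j => List.replicate (g j) (none : Option String))
      = List.replicate (((List.range n).map g).sum) none := by
  induction n with
  | zero => simp
  | succ n ih =>
    rw [List.range_succ, List.flatMap_append, ih, List.map_append, List.sum_append]
    simp only [List.flatMap_cons, List.flatMap_nil, List.append_nil, List.map_cons,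
      List.sum_cons, List.map_nil, List.sum_nil, Nat.add_zero]
    rw [← List.replicate_add]

lemma set_append_middle {α : Type} (l1 : List α) (x : α) (l2 : List α) (v : α) :
    (l1 ++ x :: l2).set l1.length v = l1 ++ v :: l2 := by
  rw [List.set_append]
  simp

-- the scatter lemma: A's reverse placement produces the bucket-grouped list ---

lemma wb_spec (l : List (Nat × String)) : ∀ (zs : List Nat) (c : Nat) (L : Nat → Int),
    (∀ p ∈ l, p.1 < 100) → (∀ z ∈ zs, z < 100) →
    l.length + zs.length ≤ c →
    (∀ j, j < 100 → L j = (((l.map Prod.fst ++ zs).countP (fun y => y ≤ j) : Nat) : Int)) →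
    (wb l (List.replicate c none) L).1
      = (List.range 100).flatMap (block l zs)
        ++ List.replicate (c - (l.length + zs.length)) none := by
  induction l with
  | nil =>
    intro zs c L _ hz hc _
    have hb : block ([] : List (Nat × String)) zs = fun j => List.replicate (zs.count j) none := by
      funext j
      simp [block]
    simp only [wb, List.length_nil, Nat.zero_add, hb]
    rw [flatMap_replicate_none (fun j => zs.count j) 100, sum_count_range]
    have hlen : zs.countP (fun y => y < 100) = zs.length :=
      List.countP_eq_length.mpr (fun a ha => by simpa using hz a ha)
    rw [hlen, ← List.replicate_add]
    congr 1
    omega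
  | cons p rest ih =>
    obtain ⟨k, v⟩ := p
    intro zs c L hl hz hc hL
    have hk100 : k < 100 := (hl (k, v) List.mem_cons_self)
    have hrest : ∀ p ∈ rest, p.1 < 100 := fun p hp => hl p (List.mem_cons_of_mem _ hp)
    have hz' : ∀ z ∈ k :: zs, z < 100 := by
      intro z hzz
      rcases List.mem_cons.mp hzz with h | h
      · subst h; exact hk100
      · exact hz z h
    have hc' : rest.length + (k :: zs).length ≤ c := by
      simp only [List.length_cons] at hc ⊢; omega
    have hL' : ∀ j, j < 100 → L j = (((rest.map Prod.fst ++ (k :: zs)).countP (fun y => y ≤ j) : Nat) : Int) := by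
      intro j hj
      rw [hL j hj]
      congr 1
      simp only [List.map_cons, List.countP_append, List.countP_cons]
      omega
    simp only [wb]
    rw [ih (k :: zs) c L hrest hz' hc' hL']
    -- the slot where v is written
    have hsplit1 := countP_le_split (rest.map Prod.fst) k
    have hsplit2 := countP_le_split zs k
    have hpos : (wb rest (List.replicate c none) L).2 k - 1
        = (((rest.map Prod.fst).countP (fun y => y < k) + zs.countP (fun y => y < k)
             + zs.count k : Nat) : Int) := by
      rw [wb_snd, hL k hk100]
      simp only [List.map_cons, List.countP_append, List.countP_cons, decide_true,
        Nat.le_refl, if_true]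
      push_cast
      omega
    rw [hpos]
    have hsplitR : List.range 100 = List.range k ++ k :: (List.range (99 - k)).map (fun x => k + (x + 1)) := by
      have h1 : (100 : Nat) = k + (100 - k) := by omega
      rw [h1, List.range_add]
      congr 1
      have h2 : 100 - k = (99 - k) + 1 := by omega
      rw [h2, List.range_succ_eq_map]
      simp [List.map_map, Function.comp_def, Nat.succ_eq_add_one]
    rw [hsplitR]
    simp only [List.flatMap_append, List.flatMap_cons]
    -- the two flanks and the pad agree between the two sides
    have hFA' : (List.range k).flatMap (block ((k, v) :: rest) zs)
        = (List.range k).flatMap (block rest (k :: zs)) := by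
      apply List.flatMap_congr
      intro j hj
      have hjk : ¬ k = j := by simp only [List.mem_range] at hj; omega
      simp only [block, List.count_cons, beq_iff_eq, if_neg hjk, Nat.add_zero]
      rw [List.filter_cons_of_neg (by simp only [beq_iff_eq]; exact hjk)]
    have hFB' : ((List.range (99 - k)).map (fun x => k + (x + 1))).flatMap (block ((k, v) :: rest) zs)
        = ((List.range (99 - k)).map (fun x => k + (x + 1))).flatMap (block rest (k :: zs)) := by
      apply List.flatMap_congr
      intro j hj
      have hjk : ¬ k = j := by
        simp only [List.mem_map, List.mem_range] at hj
        obtain ⟨x, _, hx⟩ := hj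
        omega
      simp only [block, List.count_cons, beq_iff_eq, if_neg hjk, Nat.add_zero]
      rw [List.filter_cons_of_neg (by simp only [beq_iff_eq]; exact hjk)]
    have hpadeq : c - (((k, v) :: rest).length + zs.length) = c - (rest.length + (k :: zs).length) := by
      simp only [List.length_cons]
      omega
    have hbold : block rest (k :: zs) k
        = (List.replicate (zs.count k) none ++ (none : Option String) ::
            (rest.filter (fun p => p.1 == k)).map (fun p => some p.2)) := by
      simp only [block, List.count_cons, beq_iff_eq, if_true]
      rw [show List.count k zs + 1 = List.count k zs + 1 from rfl, List.replicate_succ',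
        List.append_assoc, List.singleton_append]
    have hbnew : block ((k, v) :: rest) zs k
        = (List.replicate (zs.count k) none ++ (some v) ::
            (rest.filter (fun p => p.1 == k)).map (fun p => some p.2)) := by
      simp only [block]
      rw [List.filter_cons_of_pos (by simp)]
      simp
    rw [hFA', hFB', hpadeq, hbold, hbnew]
    -- length of the left flank
    have hcount_map : ∀ j : Nat, (rest.map Prod.fst).count j = rest.countP (fun p => p.1 == j) := by
      intro j
      rw [List.count_eq_countP, List.countP_map]
      rfl
    have hFAlen : ((List.range k).flatMap (block rest (k :: zs))).length
        = (rest.map Prod.fst).countP (fun y => y < k) + zs.countP (fun y => y < k) := by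
      rw [List.length_flatMap]
      have h1 : ∀ j ∈ List.range k,
          (fun j => (block rest (k :: zs) j).length) j
            = (fun j => zs.count j + (rest.map Prod.fst).count j) j := by
        intro j hj
        have hjk : ¬ k = j := by simp only [List.mem_range] at hj; omega
        simp only [block, List.length_append, List.length_replicate, List.length_map,
          List.count_cons, beq_iff_eq, if_neg hjk, Nat.add_zero, hcount_map j,
          ← List.countP_eq_length_filter]
      rw [List.map_congr_left h1, List.sum_map_add]
      rw [sum_count_range, sum_count_range]
      omega
    -- do the single write
    have hassoc : ∀ x : Option String,
        (List.range k).flatMap (block rest (k :: zs))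
            ++ ((List.replicate (zs.count k) none ++ x ::
                  (rest.filter (fun p => p.1 == k)).map (fun p => some p.2))
                ++ ((List.range (99 - k)).map (fun x => k + (x + 1))).flatMap (block rest (k :: zs)))
            ++ List.replicate (c - (rest.length + (k :: zs).length)) none
          = ((List.range k).flatMap (block rest (k :: zs)) ++ List.replicate (zs.count k) none)
            ++ x :: ((rest.filter (fun p => p.1 == k)).map (fun p => some p.2)
                ++ (((List.range (99 - k)).map (fun x => k + (x + 1))).flatMap (block rest (k :: zs))
                    ++ List.replicate (c - (rest.length + (k :: zs).length)) none)) := by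
      intro x
      simp [List.append_assoc]
    rw [hassoc, hassoc, PySem.List.pySetD_of_nonneg _ _ (Int.natCast_nonneg _)]
    rw [show ((((rest.map Prod.fst).countP (fun y => y < k) + zs.countP (fun y => y < k)
          + zs.count k : Nat) : Int)).toNat
        = ((List.range k).flatMap (block rest (k :: zs))
            ++ List.replicate (zs.count k) none).length by
      simp [hFAlen]
      omega]
    exact set_append_middle _ _ _ _
-- characterisations of A's counting table and prefix-sum table ---------------

lemma pykey_natCast (m : Nat) : pykey (m : Int) = m := by
  simp [pykey, if_neg (by omega : ¬ (m : Int) < 0)]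

lemma countP_le_zero (l : List Nat) : l.countP (fun y => y ≤ 0) = l.count 0 := by
  rw [List.count_eq_countP]
  apply List.countP_congr
  intro a _
  constructor <;> (intro hx; simp at hx ⊢; omega)

lemma countP_le_succ (l : List Nat) (m : Nat) :
    l.countP (fun y => y ≤ m + 1) = l.countP (fun y => y ≤ m) + l.count (m + 1) := by
  rw [countP_le_split]
  congr 1
  apply List.countP_congr
  intro a _
  constructor <;> (intro hx; simp at hx ⊢; omega)

lemma filter_length_count (keys : List Int) (j : Nat) :
    (keys.filter (fun x => pykey x == j)).length = (keys.map pykey).count j := by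
  rw [List.count_eq_countP, List.countP_map, ← List.countP_eq_length_filter]
  rfl

lemma count_elements_spec (keys : List Int) (hk : ∀ k ∈ keys, -100 ≤ k ∧ k < 100) :
    count_elements keys
      = (List.range 100).map (fun j => (((keys.map pykey).count j : Nat) : Int)) := by
  unfold count_elements
  have hinit : (PySem.List.pyRange 0 100 1).map (fun _ => (0 : Int))
      = (List.range 100).map (fun _ => (0 : Int)) := by
    rw [List.map_const', List.map_const', PySem.List.length_pyRange_one, List.length_range]
    rfl
  rw [hinit, foldl_table keys (fun v => v) (fun acc _ => acc + 1) 0 (fun _ => 0) hk]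
  apply List.map_congr_left
  intro j _
  rw [PySem.List.foldl_add (g := fun _ => (1 : Int))]
  simp [List.map_const', List.sum_replicate, filter_length_count]

lemma leq_loop (cnt F : Nat → Int) (hF0 : F 0 = cnt 0)
    (hFs : ∀ j : Nat, F (j + 1) = cnt (j + 1) + F j) :
    ∀ m : Nat, 1 ≤ m → m ≤ 100 →
    (PySem.List.pyRange 1 (m : Int) 1).foldl
      (fun L i => L ++ [PySem.List.pyGetD ((List.range 100).map cnt) i 0
                          + PySem.List.pyGetD L (i - 1) 0])
      [PySem.List.pyGetD ((List.range 100).map cnt) 0 0]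
    = (List.range m).map F := by
  intro m
  induction m with
  | zero => omega
  | succ m ih =>
    intro h1 h2
    by_cases hm : m = 0
    · subst hm
      rw [PySem.List.pyRange_one_eq_nil (by omega)]
      rw [table_get cnt 0 0 (by omega) (by omega)]
      simp [pykey, hF0]
    · have h1m : 1 ≤ m := by omega
      rw [show ((m + 1 : Nat) : Int) = (m : Int) + 1 by push_cast; ring,
        PySem.List.pyRange_one_succ_right (by omega : (1 : Int) ≤ (m : Int)),
        List.foldl_append, ih h1m (by omega)]
      simp only [List.foldl_cons, List.foldl_nil]
      rw [table_get cnt (m : Int) 0 (by omega) (by exact_mod_cast (by omega : m < 100)),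
        pykey_natCast]
      rw [show ((m : Int) - 1) = ((m - 1 : Nat) : Int) by omega, PySem.List.pyGetD_natCast]
      rw [List.getD_eq_getElem _ _ (by simp; omega), List.getElem_map, List.getElem_range]
      rw [List.range_succ, List.map_append]
      simp only [List.map_cons, List.map_nil]
      congr 2
      rw [show m = (m - 1) + 1 by omega, hFs (m - 1)]
      congr 2

lemma count_leq_spec (keys : List Int) (hk : ∀ k ∈ keys, -100 ≤ k ∧ k < 100) :
    count_leq keys
      = (List.range 100).map
          (fun j => (((keys.map pykey).countP (fun y => y ≤ j) : Nat) : Int)) := by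
  simp only [count_leq]
  rw [count_elements_spec keys hk]
  have hlen : (((List.range 100).map (fun j => (((keys.map pykey).count j : Nat) : Int))).length : Int) = (100 : Int) := by
    simp
  rw [hlen]
  exact leq_loop (fun j => (((keys.map pykey).count j : Nat) : Int))
    (fun j => (((keys.map pykey).countP (fun y => y ≤ j) : Nat) : Int))
    (by push_cast [countP_le_zero]; rfl)
    (fun j => by push_cast [countP_le_succ]; ring)
    100 (by omega) (by omega)

-- A's iteration order: enumerate(reversed(array)) ------------------------------

lemma enumerate_shift {α : Type} (xs : List α) (s : Int) :
    PySem.List.enumerate xs s = (PySem.List.enumerate xs 0).map (fun p => (p.1 + s, p.2)) := by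
  induction xs generalizing s with
  | nil => simp [PySem.List.enumerate]
  | cons x t ih =>
    simp only [PySem.List.enumerate, List.map_cons]
    rw [ih (s + 1), show (0 : Int) + 1 = 1 from rfl, ih 1, List.map_map]
    congr 1
    · norm_num
    · apply List.map_congr_left
      intro p _
      simp only [Function.comp_def]
      rw [Prod.mk.injEq]
      exact ⟨by ring, rfl⟩

lemma enumerate_reverse {α : Type} (xs : List α) :
    PySem.List.enumerate xs.reverse 0
      = ((PySem.List.enumerate xs 0).map
          (fun p => ((xs.length : Int) - 1 - p.1, p.2))).reverse := by
  induction xs with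
  | nil => simp [PySem.List.enumerate]
  | cons x t ih =>
    rw [List.reverse_cons, PySem.List.enumerate_append, ih]
    simp only [PySem.List.enumerate, List.map_cons, List.reverse_cons, List.length_cons]
    congr 1
    · rw [show (0 : Int) + 1 = 1 from rfl, enumerate_shift t 1, List.map_map]
      congr 1
      apply List.map_congr_left
      intro p _
      simp only [Function.comp_def]
      rw [Prod.mk.injEq]
      exact ⟨by push_cast; ring, rfl⟩
    · simp only [List.cons.injEq, Prod.mk.injEq, and_true, List.length_reverse]
      push_cast
      ring

-- the placement loop is wb on the cleaned, masked pairs -----------------------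

lemma loop_eq_wb (M : Int) (zs : List (Int × (Int × String))) (S : List (Option String))
    (Lf : Nat → Int) (hk : ∀ p ∈ zs, -100 ≤ p.2.1 ∧ p.2.1 < 100) :
    zs.foldr (fun iv SL =>
        (PySem.List.pySetD SL.1 (PySem.List.pyGetD SL.2 iv.2.1 0 - 1)
            (if iv.1 < M then some iv.2.2 else some "-"),
         PySem.List.pySetD SL.2 iv.2.1 (PySem.List.pyGetD SL.2 iv.2.1 0 - 1)))
      (S, (List.range 100).map Lf)
    = ((wb (zs.map (fun iv => (pykey iv.2.1, if iv.1 < M then iv.2.2 else "-"))) S Lf).1,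
       (List.range 100).map
         ((wb (zs.map (fun iv => (pykey iv.2.1, if iv.1 < M then iv.2.2 else "-"))) S Lf).2)) := by
  induction zs with
  | nil => simp [wb]
  | cons iv zs ih =>
    have hx := hk iv List.mem_cons_self
    simp only [List.foldr_cons, List.map_cons]
    rw [ih (fun p hp => hk p (List.mem_cons_of_mem _ hp))]
    simp only [wb]
    rw [table_get _ _ _ hx.1 hx.2, table_set _ _ _ hx.1 hx.2]
    rw [Prod.mk.injEq]
    constructor
    · rw [← apply_ite some]
    · apply List.map_congr_left
      intro j _
      rw [Function.update_apply]

lemma enum_map_proj {α β : Type} (xs : List α) (g : α → β) :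
    (PySem.List.enumerate xs 0).map (fun p => g p.2) = xs.map g := by
  calc (PySem.List.enumerate xs 0).map (fun p => g p.2)
      = ((PySem.List.enumerate xs 0).map (fun p => p.2)).map g := by rw [List.map_map]; rfl
    _ = xs.map g := by rw [PySem.List.map_snd_enumerate]

-- normal forms of the two sides ------------------------------------------------

def maskF (count : Int) (array : List (Int × String)) (p : Int × (Int × String)) : String :=
  if (array.length : Int) - PySem.Int.floordiv count 2 ≤ p.1 then p.2.2 else "-"

def groupedF (count : Int) (array : List (Int × String)) : List String :=
  (List.range 100).flatMap
    (fun j => ((PySem.List.enumerate array 0).filter (fun p => pykey p.2.1 == j)).map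
                (maskF count array))

lemma grouped_length (count : Int) (array : List (Int × String))
    (hkeys : ∀ p ∈ array, -100 ≤ p.1 ∧ p.1 < 100) :
    (groupedF count array).length = array.length := by
  unfold groupedF
  rw [List.length_flatMap]
  have h1 : ∀ j ∈ List.range 100,
      (fun j => (((PySem.List.enumerate array 0).filter (fun p => pykey p.2.1 == j)).map
          (maskF count array)).length) j
        = (fun j => ((PySem.List.enumerate array 0).map (fun p => pykey p.2.1)).count j) j := by
    intro j _
    simp only [List.length_map, List.count_eq_countP, List.countP_map,
      ← List.countP_eq_length_filter]
    rfl
  rw [List.map_congr_left h1, sum_count_range, List.countP_eq_length.mpr, List.length_map,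
    PySem.List.length_enumerate]
  intro a ha
  simp only [List.mem_map] at ha
  obtain ⟨p, hp, rfl⟩ := ha
  rw [PySem.List.mem_enumerate_iff] at hp
  obtain ⟨k, hk, rfl⟩ := hp
  have := hkeys _ (List.getElem_mem hk)
  simpa using pykey_lt _ this.1 this.2

lemma B_norm (count : Int) (array : List (Int × String))
    (hkeys : ∀ p ∈ array, -100 ≤ p.1 ∧ p.1 < 100) :
    sort_values_alt count array
      = (groupedF count array).map some
        ++ List.replicate (count - ((groupedF count array).length : Int)).toNat none := by
  have henumkeys : ∀ p ∈ PySem.List.enumerate array 0, -100 ≤ p.2.1 ∧ p.2.1 < 100 := by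
    intro p hp
    rw [PySem.List.mem_enumerate_iff] at hp
    obtain ⟨k, hk, rfl⟩ := hp
    exact hkeys _ (List.getElem_mem hk)
  simp only [sort_values_alt]
  have hinit : (PySem.List.pyRange 0 100 1).map (fun _ => ([] : List String))
      = (List.range 100).map (fun _ => ([] : List String)) := by
    rw [List.map_const', List.map_const', PySem.List.length_pyRange_one, List.length_range]
    rfl
  rw [hinit, foldl_table (PySem.List.enumerate array 0) (fun p => p.2.1)
    (fun b p => b ++ [if (array.length : Int) - PySem.Int.floordiv count 2 ≤ p.1 then p.2.2 else "-"])
    [] (fun _ => []) henumkeys]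
  have hbk : ∀ j ∈ List.range 100,
      (fun j => ((PySem.List.enumerate array 0).filter (fun p => pykey p.2.1 == j)).foldl
        (fun b p => b ++ [if (array.length : Int) - PySem.Int.floordiv count 2 ≤ p.1 then p.2.2 else "-"]) []) j
      = (fun j => ((PySem.List.enumerate array 0).filter (fun p => pykey p.2.1 == j)).map
          (maskF count array)) j := by
    intro j _
    dsimp only
    have hfun : (fun (b : List String) (p : Int × (Int × String)) =>
        b ++ [if (array.length : Int) - PySem.Int.floordiv count 2 ≤ p.1 then p.2.2 else "-"])
        = (fun b p => b ++ [maskF count array p]) := rfl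
    rw [hfun, PySem.List.foldl_append_singleton_eq_map (maskF count array), List.nil_append]
  rw [List.map_congr_left hbk, List.flatMap_map]
  rfl

lemma A_norm (count : Int) (array : List (Int × String))
    (hkeys : ∀ p ∈ array, -100 ≤ p.1 ∧ p.1 < 100)
    (hc : array.length ≤ count.toNat) :
    sort_values count array
      = (groupedF count array).map some
        ++ List.replicate (count.toNat - array.length) none := by
  have henumkeys : ∀ p ∈ PySem.List.enumerate array 0, -100 ≤ p.2.1 ∧ p.2.1 < 100 := by
    intro p hp
    rw [PySem.List.mem_enumerate_iff] at hp
    obtain ⟨k, hk, rfl⟩ := hp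
    exact hkeys _ (List.getElem_mem hk)
  have hkb : ∀ k ∈ array.map (fun val => val.1), -100 ≤ k ∧ k < 100 := by
    intro k hkk
    simp only [List.mem_map] at hkk
    obtain ⟨p, hp, rfl⟩ := hkk
    exact hkeys p hp
  simp only [sort_values]
  rw [count_leq_spec _ hkb]
  have hS0 : (PySem.List.pyRange 0 count 1).map (fun _ => (none : Option String))
      = List.replicate count.toNat none := by
    rw [List.map_const', PySem.List.length_pyRange_one]
    congr 1
    omega
  rw [hS0, enumerate_reverse, List.foldl_reverse]
  rw [loop_eq_wb (PySem.Int.floordiv count 2) _ _ _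
    (by
      intro p hp
      simp only [List.mem_map] at hp
      obtain ⟨q, hq, rfl⟩ := hp
      exact henumkeys q hq)]
  -- the cleaned list is exactly the forward-masked one
  have hclean :
      ((PySem.List.enumerate array 0).map
          (fun p => ((array.length : Int) - 1 - p.1, p.2))).map
        (fun iv => (pykey iv.2.1,
           if iv.1 < PySem.Int.floordiv count 2 then iv.2.2 else "-"))
      = (PySem.List.enumerate array 0).map
          (fun p => (pykey p.2.1, maskF count array p)) := by
    rw [List.map_map]
    apply List.map_congr_left
    intro p _
    simp only [Function.comp_def, maskF]
    rw [Prod.mk.injEq]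
    refine ⟨rfl, ?_⟩
    rw [if_congr (show ((array.length : Int) - 1 - p.1 < PySem.Int.floordiv count 2)
        ↔ ((array.length : Int) - PySem.Int.floordiv count 2 ≤ p.1) by omega) rfl rfl]
  rw [hclean]
  dsimp only
  rw [wb_spec ((PySem.List.enumerate array 0).map
      (fun p => (pykey p.2.1, maskF count array p))) [] count.toNat
    (fun j => ((List.countP (fun y => decide (y ≤ j))
        (List.map pykey (List.map (fun val => val.1) array)) : Nat) : Int))
    (by
      intro p hp
      simp only [List.mem_map] at hp
      obtain ⟨q, hq, rfl⟩ := hp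
      have := henumkeys q hq
      exact pykey_lt _ this.1 this.2)
    (by simp)
    (by simp [PySem.List.length_enumerate]; omega)
    (by
      intro j hj
      rw [List.append_nil]
      dsimp only
      congr 2
      simp only [List.map_map, Function.comp_def]
      rw [← enum_map_proj array (fun v => pykey v.1)])]
  -- identify the flatMap with groupedF and the pad
  congr 1
  · unfold groupedF
    rw [List.map_flatMap]
    apply List.flatMap_congr
    intro j _
    simp only [block, List.count_nil, List.replicate_zero, List.nil_append, List.filter_map,
      List.map_map]
    rfl
  · simp [PySem.List.length_enumerate]

theorem sort_values_spec : Claim_equal_sort_values := by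
  intro count array _ hpre
  unfold Spec_sort_values
  have hkeys : ∀ p ∈ array, -100 ≤ p.1 ∧ p.1 < 100 := by
    rcases hpre with h | h
    · intro p hp
      rw [h] at hp
      simp at hp
    · exact h.2
  have hc : array.length ≤ count.toNat := by
    rcases hpre with h | h
    · rw [h]
      simp
    · have := h.1
      omega
  rw [A_norm count array hkeys hc, B_norm count array hkeys, grouped_length count array hkeys]
  congr 2
  omega
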